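-- pv_equiv track=rewrite | github.com/LUMII-Syslab/RSE | data_utils.py | get_prev_indices
-- ===== SOURCE A (Python) =====
-- def get_prev_indices(n_bits):
--     length = 1 << n_bits
--     ptr = [-1] * length
--     for k in range(1, n_bits):
--         ofs = ptr.index(-1)
--         step = 1 << k
--         prev = -2
--         while ofs < length:
--             assert ptr[ofs] == -1
--             ptr[ofs] = prev
--             prev = ofs
--             ofs += step
--
--     return ptr
-- ===== SOURCE B (Python) =====
-- def get_prev_indices(n_bits):
--     # Each iteration k fills positions 2^(k-1)-1, 2^(k-1)-1+2^k, ... in one bulk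
--     # slice assignment; the written values are -2 followed by the previous positions.
--     length = 1 << n_bits
--     ptr = [-1] * length
--     for k in range(1, n_bits):
--         step = 1 << k
--         start = (1 << (k - 1)) - 1
--         vals = list(range(start - step, length - step, step))
--         vals[0] = -2
--         ptr[start::step] = vals
--     return ptr
-- ===== Notes on version B (the rewrite author's own statement) =====
-- stated objective: faster
-- what changed: B computes each iteration's start offset directly as 2^(k-1)-1 instead of scanning with ptr.index(-1), and writes the whole arithmetic chain of values with one bulk extended-slice assignment per iteration instead of A's element-wise while loop.
-- outside the precondition, e.g. on get_prev_indices(-1): A raises ValueError, B raises ValueError; on get_prev_indices(63): A raises OverflowError, B raises OverflowError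
import Mathlib
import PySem

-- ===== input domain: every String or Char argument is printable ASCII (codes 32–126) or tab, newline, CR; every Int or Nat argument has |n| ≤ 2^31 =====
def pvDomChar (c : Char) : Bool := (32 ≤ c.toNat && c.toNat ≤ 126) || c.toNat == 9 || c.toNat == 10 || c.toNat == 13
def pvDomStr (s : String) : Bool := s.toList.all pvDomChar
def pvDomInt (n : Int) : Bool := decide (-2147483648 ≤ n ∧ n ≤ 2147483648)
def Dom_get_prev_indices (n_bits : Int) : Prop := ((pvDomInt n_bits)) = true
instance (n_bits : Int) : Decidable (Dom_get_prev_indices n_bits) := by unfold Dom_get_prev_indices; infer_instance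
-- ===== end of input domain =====

-- B replaces A's element-wise inner while loop and its repeated ptr.index(-1) scan by one
-- bulk slice assignment per iteration with a directly computed start offset (constant-factor speed-up).

-- ===== PORT A =====
-- the 'while ofs < length' loop; the fuel only makes it total (every call site passes
-- fuel = len(ptr)+1 > number of iterations, since ofs grows by step ≥ 2 each round)
def aFill : Nat → List Int → Int → Int → Int → Int → List Int
  | 0, ptr, _, _, _, _ => ptr
  | fuel + 1, ptr, ofs, step, prev, length =>
    if ofs < length then
      -- 'assert ptr[ofs] == -1' never fires (the proof's invariant shows ptr[ofs] = -1 here)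
      aFill fuel (PySem.List.pySetD ptr ofs prev) (ofs + step) step ofs length
    else ptr

-- body of 'for k in range(1, n_bits)'
def aStep (length : Int) (ptr : List Int) (k : Int) : List Int :=
  let ofs : Int := (((PySem.List.index? ptr (-1)).getD 0 : Nat) : Int)  -- ptr.index(-1); ValueError impossible: -1 is present whenever the loop body runs
  let step : Int := 1 <<< k.toNat   -- 1 << k  (k ≥ 1 here)
  aFill (ptr.length + 1) ptr ofs step (-2) length

def get_prev_indices (n_bits : Int) : List Int :=
  let length : Int := 1 <<< n_bits.toNat   -- 1 << n_bits; n_bits < 0 raises ValueError → outside Pre_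
  (PySem.List.pyRange 1 n_bits 1).foldl (aStep length) (List.replicate length.toNat (-1))

-- ===== PORT B =====
-- extended-slice assignment ptr[pos::step] = vals (exact here: B always passes a vals of
-- exactly the slice's length, so Python's length-mismatch ValueError cannot fire)
def bAssign (ptr : List Int) (pos step : Nat) : List Int → List Int
  | [] => ptr
  | v :: vs => bAssign (ptr.set pos v) (pos + step) step vs

-- body of 'for k in range(1, n_bits)'
def bStep (length : Int) (ptr : List Int) (k : Int) : List Int :=
  let step : Int := 1 <<< k.toNat                  -- 1 << k
  let start : Int := (1 <<< (k - 1).toNat) - 1     -- (1 << (k-1)) - 1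
  let vals := (PySem.List.pyRange (start - step) (length - step) step).set 0 (-2)
    -- vals[0] = -2; the range is never empty here (start < length), so no IndexError
  bAssign ptr start.toNat step.toNat vals

def get_prev_indices_alt (n_bits : Int) : List Int :=
  let length : Int := 1 <<< n_bits.toNat
  (PySem.List.pyRange 1 n_bits 1).foldl (bStep length) (List.replicate length.toNat (-1))

-- ===== PRECONDITION & SPEC =====
-- Pre_ excludes exactly the inputs where A raises: n_bits < 0 ('1 << n_bits' raises
-- ValueError) and n_bits ≥ 63 ('[-1] * (1 << n_bits)' asks for a list longer than
-- sys.maxsize = 2^63-1 and raises OverflowError).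
def Pre_get_prev_indices (n_bits : Int) : Prop := 0 ≤ n_bits ∧ n_bits < 63
instance (n_bits : Int) : Decidable (Pre_get_prev_indices n_bits) := by unfold Pre_get_prev_indices; infer_instance
def pvWitness_get_prev_indices : Int := 3

def Spec_get_prev_indices (n_bits : Int) (out : List Int) : Prop := out = get_prev_indices_alt n_bits
instance (n_bits : Int) (out : List Int) : Decidable (Spec_get_prev_indices n_bits out) := by unfold Spec_get_prev_indices; infer_instance

-- ===== CLAIM (what is proved, stated in full; the proofs are below) =====
def Claim_equal_get_prev_indices : Prop := ∀ (n_bits : Int), Dom_get_prev_indices n_bits → Pre_get_prev_indices n_bits → Spec_get_prev_indices n_bits (get_prev_indices n_bits)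

-- ===== LEMMAS AND PROOFS =====

def vtz (m : Nat) : Nat :=
  if h : m % 2 = 0 ∧ m ≠ 0 then vtz (m / 2) + 1 else 0
  termination_by m
  decreasing_by exact Nat.div_lt_self (Nat.pos_of_ne_zero h.2) one_lt_two

lemma vtz_rep (m : Nat) (h : m ≠ 0) : ∃ t, m = 2 ^ vtz m * (2 * t + 1) := by
  induction m using Nat.strong_induction_on with
  | _ m ih =>
    rw [vtz]
    split_ifs with h2
    · obtain ⟨he, hne⟩ := h2
      have hlt : m / 2 < m := Nat.div_lt_self (Nat.pos_of_ne_zero h) one_lt_two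
      obtain ⟨t, ht⟩ := ih (m / 2) hlt (by omega)
      refine ⟨t, ?_⟩
      calc m = 2 * (m / 2) := by omega
        _ = 2 * (2 ^ vtz (m / 2) * (2 * t + 1)) := by rw [← ht]
        _ = 2 ^ (vtz (m / 2) + 1) * (2 * t + 1) := by ring
    · exact ⟨m / 2, by omega⟩

lemma vtz_eq_of_rep (K t : Nat) : vtz (2 ^ K * (2 * t + 1)) = K := by
  induction K with
  | zero =>
    have h1 : 2 ^ 0 * (2 * t + 1) = 2 * t + 1 := by ring
    rw [h1, vtz, dif_neg (by omega)]
  | succ K ih =>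
    have h1 : 2 ^ (K + 1) * (2 * t + 1) = 2 * (2 ^ K * (2 * t + 1)) := by ring
    have hp : 0 < 2 ^ K * (2 * t + 1) := by positivity
    rw [vtz, dif_pos (by omega)]
    have h2 : 2 ^ (K + 1) * (2 * t + 1) / 2 = 2 ^ K * (2 * t + 1) := by omega
    rw [h2, ih]

lemma vtz_lt_of_lt_pow {j K : Nat} (h : j + 1 < 2 ^ K) : vtz (j + 1) < K := by
  by_contra hle
  rw [not_lt] at hle
  obtain ⟨t, ht⟩ := vtz_rep (j + 1) (by omega)
  have h1 : 2 ^ K ≤ 2 ^ vtz (j + 1) := Nat.pow_le_pow_right (by norm_num) hle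
  have h2 : 2 ^ vtz (j + 1) ≤ 2 ^ vtz (j + 1) * (2 * t + 1) := Nat.le_mul_of_pos_right _ (by omega)
  omega

def cval (i : Nat) : Int :=
  if i + 1 = 2 ^ vtz (i + 1) then -2 else (i : Int) - 2 ^ (vtz (i + 1) + 1)

lemma vtz_pow (K : Nat) : vtz (2 ^ K) = K := by
  have := vtz_eq_of_rep K 0
  simpa using this

lemma cval_ne_neg_one (i : Nat) : cval i ≠ -1 := by
  unfold cval
  split_ifs with h
  · decide
  · intro hc
    have h2 : (i : Int) + 1 = 2 ^ (vtz (i + 1) + 1) := by linarith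
    have h3 : i + 1 = 2 ^ (vtz (i + 1) + 1) := by exact_mod_cast h2
    have := vtz_pow (vtz (i + 1) + 1)
    rw [← h3] at this
    omega

def gmodel (K i : Nat) : Int := if vtz (i + 1) < K then cval i else -1

def model (N K : Nat) : List Int := (List.range (2 ^ N)).map (gmodel K)

lemma gmodel_ne_neg_one_of_lt {K j : Nat} (h : j + 1 < 2 ^ K) : gmodel K j ≠ -1 := by
  unfold gmodel
  rw [if_pos (vtz_lt_of_lt_pow h)]
  exact cval_ne_neg_one j

lemma gmodel_pow_sub_one (K : Nat) : gmodel K (2 ^ K - 1) = -1 := by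
  unfold gmodel
  have hp := Nat.two_pow_pos K
  have h1 : (2 ^ K - 1) + 1 = 2 ^ K := by omega
  rw [h1, vtz_pow, if_neg (lt_irrefl K)]

lemma index?_model (N K : Nat) (hK : K < N) :
    PySem.List.index? (model N K) (-1) = some (2 ^ K - 1) := by
  have hp := Nat.two_pow_pos K
  have hle : 2 ^ K ≤ 2 ^ N := Nat.pow_le_pow_right (by norm_num) (le_of_lt hK)
  rw [PySem.List.index?_eq_some_iff]
  refine ⟨(List.range (2 ^ K - 1)).map (gmodel K),
    ((List.range (2 ^ N - 2 ^ K)).map (fun x => 2 ^ K + x)).map (gmodel K), ?_, by simp, ?_⟩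
  · have h1 : 2 ^ N = (2 ^ K - 1 + 1) + (2 ^ N - 2 ^ K) := by omega
    rw [model, h1, List.range_add, List.range_succ]
    have h2 : 2 ^ K - 1 + 1 = 2 ^ K := by omega
    simp only [List.map_append, List.map_map, List.append_assoc, List.map_cons,
      List.cons_append, List.nil_append, h2]
    rw [gmodel_pow_sub_one]
    have h3 : 2 ^ K + (2 ^ N - 2 ^ K) - 2 ^ K = 2 ^ N - 2 ^ K := by omega
    rw [h3]
  · intro hmem
    obtain ⟨j, hj, hgj⟩ := List.mem_map.mp hmem
    have hjlt : j < 2 ^ K - 1 := List.mem_range.mp hj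
    exact gmodel_ne_neg_one_of_lt (by omega) hgj

lemma bAssign_point (step : Nat) (hstep : 0 < step) :
    ∀ (vals ptr : List Int) (pos : Nat),
      (bAssign ptr pos step vals).length = ptr.length ∧
      (∀ j, j < vals.length → pos + j * step < ptr.length →
        (bAssign ptr pos step vals).getD (pos + j * step) 0 = vals.getD j 0) ∧
      (∀ i, i < ptr.length → (∀ j, j < vals.length → i ≠ pos + j * step) →
        (bAssign ptr pos step vals).getD i 0 = ptr.getD i 0) := by
  intro vals
  induction vals with
  | nil => intro ptr pos; exact ⟨rfl, fun j hj => by simp at hj, fun i _ _ => rfl⟩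
  | cons v vs ih =>
    intro ptr pos
    obtain ⟨ihlen, ihw, ihu⟩ := ih (ptr.set pos v) (pos + step)
    have hlen' : (ptr.set pos v).length = ptr.length := by simp
    refine ⟨by simpa [bAssign] using ihlen, ?_, ?_⟩
    · intro j hj hlt
      show (bAssign (ptr.set pos v) (pos + step) step vs).getD (pos + j * step) 0 = _
      match j with
      | 0 =>
        have hpos : pos < ptr.length := by simpa using hlt
        have h0 : pos + 0 * step = pos := by ring
        rw [h0]
        rw [ihu pos (by omega) (fun j' hj' => by
          have := Nat.mul_le_mul_right step (Nat.zero_le j')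
          omega)]
        simp [hlen', hpos, List.getElem_set_self]
      | j' + 1 =>
        have he : pos + (j' + 1) * step = (pos + step) + j' * step := by ring
        rw [he]
        rw [ihw j' (by simpa using hj) (by omega)]
        simp
    · intro i hi hne
      show (bAssign (ptr.set pos v) (pos + step) step vs).getD i 0 = _
      rw [ihu i (by omega) (fun j' hj' => by
        have he : (pos + step) + j' * step = pos + (j' + 1) * step := by ring
        rw [he]
        exact hne (j' + 1) (by simpa using hj'))]
      have hip : i ≠ pos := by
        have := hne 0 (by simp)
        simpa using this
      rw [List.getD_eq_getElem _ _ (by omega : i < (ptr.set pos v).length),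
        List.getD_eq_getElem _ _ hi, List.getElem_set_ne (by omega)]

def ofsK (K r : Nat) : Nat := 2 ^ K - 1 + r * 2 ^ (K + 1)
def wK (K r : Nat) : Int := if r = 0 then -2 else ((ofsK K (r - 1) : Nat) : Int)

lemma ofsK_add (K m j : Nat) : ofsK K (m + j) = ofsK K m + j * 2 ^ (K + 1) := by
  unfold ofsK
  rw [Nat.add_mul]
  omega

lemma aFill_point (L K : Nat) :
    ∀ (fuel m : Nat) (ptr : List Int), ptr.length = L →
      L ≤ ofsK K m + fuel →
      (aFill fuel ptr ((ofsK K m : Nat) : Int) ((2 ^ (K + 1) : Nat) : Int) (wK K m)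
          ((L : Nat) : Int)).length = L ∧
      (∀ j, ofsK K (m + j) < L →
        (aFill fuel ptr ((ofsK K m : Nat) : Int) ((2 ^ (K + 1) : Nat) : Int) (wK K m)
            ((L : Nat) : Int)).getD (ofsK K (m + j)) 0 = wK K (m + j)) ∧
      (∀ i, i < L → (∀ j, i ≠ ofsK K (m + j)) →
        (aFill fuel ptr ((ofsK K m : Nat) : Int) ((2 ^ (K + 1) : Nat) : Int) (wK K m)
            ((L : Nat) : Int)).getD i 0 = ptr.getD i 0) := by
  intro fuel
  induction fuel with
  | zero =>
    intro m ptr hlen hfuel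
    refine ⟨by simpa [aFill] using hlen, fun j hj => ?_, fun i _ _ => rfl⟩
    exfalso
    have := ofsK_add K m j
    omega
  | succ fuel ih =>
    intro m ptr hlen hfuel
    have hspos : 0 < 2 ^ (K + 1) := Nat.two_pow_pos (K + 1)
    by_cases hb : ofsK K m < L
    · have hcond : ((ofsK K m : Nat) : Int) < ((L : Nat) : Int) := by exact_mod_cast hb
      have hset : PySem.List.pySetD ptr ((ofsK K m : Nat) : Int) (wK K m)
          = ptr.set (ofsK K m) (wK K m) := by simp
      have hofs : ((ofsK K m : Nat) : Int) + ((2 ^ (K + 1) : Nat) : Int)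
          = ((ofsK K (m + 1) : Nat) : Int) := by
        rw [ofsK_add]
        push_cast
        ring
      have hprev : ((ofsK K m : Nat) : Int) = wK K (m + 1) := by simp [wK]
      have hunf : aFill (fuel + 1) ptr ((ofsK K m : Nat) : Int) ((2 ^ (K + 1) : Nat) : Int)
            (wK K m) ((L : Nat) : Int)
          = aFill fuel (ptr.set (ofsK K m) (wK K m)) ((ofsK K (m + 1) : Nat) : Int)
            ((2 ^ (K + 1) : Nat) : Int) (wK K (m + 1)) ((L : Nat) : Int) := by
        rw [aFill, if_pos hcond, hset, hofs, hprev]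
      obtain ⟨ihlen, ihw, ihu⟩ := ih (m + 1) (ptr.set (ofsK K m) (wK K m))
        (by simpa using hlen)
        (by have h1 := ofsK_add K m 1; rw [one_mul] at h1; omega)
      rw [hunf]
      have hmono : ∀ j', ofsK K m < ofsK K (m + 1 + j') := by
        intro j'
        have h1 := ofsK_add K m (1 + j')
        have he : m + (1 + j') = m + 1 + j' := by omega
        rw [he] at h1
        have h2 : (1 + j') * 2 ^ (K + 1) ≥ 2 ^ (K + 1) :=
          Nat.le_mul_of_pos_left _ (by omega)
        omega
      refine ⟨ihlen, fun j hj => ?_, fun i hi hne => ?_⟩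
      · match j with
        | 0 =>
          rw [ihu (ofsK K (m + 0)) (by simpa using hj) (fun j' => by
            have := hmono j'
            simp only [Nat.add_zero]
            omega)]
          have hlt : ofsK K m < ptr.length := by omega
          simp [hlt, List.getElem_set_self]
        | j' + 1 =>
          have he : m + (j' + 1) = (m + 1) + j' := by omega
          rw [he]
          exact ihw j' (by rw [← he]; exact hj)
      · rw [ihu i hi (fun j' => by
          have h := hne (1 + j')
          have he : m + (1 + j') = m + 1 + j' := by omega
          rw [he] at h
          exact h)]
        have hip : i ≠ ofsK K m := by simpa using hne 0
        rw [List.getD_eq_getElem _ _ (by simpa [hlen] using hi),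
          List.getD_eq_getElem _ _ (by omega : i < ptr.length),
          List.getElem_set_ne (by omega)]
    · have hnc : ¬ ((ofsK K m : Nat) : Int) < ((L : Nat) : Int) := by
        simp only [not_lt]
        exact_mod_cast not_lt.mp hb
      have hres : aFill (fuel + 1) ptr ((ofsK K m : Nat) : Int) ((2 ^ (K + 1) : Nat) : Int)
          (wK K m) ((L : Nat) : Int) = ptr := by rw [aFill, if_neg hnc]
      refine ⟨by rw [hres]; exact hlen, fun j hj => ?_, fun i _ _ => by rw [hres]⟩
      exfalso
      have := ofsK_add K m j
      omega

lemma ofsK_succ_rep (K t : Nat) : ofsK K t + 1 = 2 ^ K * (2 * t + 1) := by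
  have hp := Nat.two_pow_pos K
  unfold ofsK
  have h : 2 ^ K * (2 * t + 1) = t * 2 ^ (K + 1) + 2 ^ K := by ring
  omega

lemma vtz_eq_iff_ofsK (K i : Nat) : vtz (i + 1) = K ↔ ∃ j, i = ofsK K j := by
  constructor
  · intro hv
    obtain ⟨t, ht⟩ := vtz_rep (i + 1) (by omega)
    rw [hv] at ht
    refine ⟨t, ?_⟩
    have := ofsK_succ_rep K t
    omega
  · rintro ⟨j, rfl⟩
    have h1 := ofsK_succ_rep K j
    rw [h1, vtz_eq_of_rep]

lemma wK_eq_cval (K j : Nat) : wK K j = cval (ofsK K j) := by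
  have hp := Nat.two_pow_pos K
  have hv : vtz (ofsK K j + 1) = K := (vtz_eq_iff_ofsK K _).mpr ⟨j, rfl⟩
  unfold wK cval
  rw [hv]
  match j with
  | 0 =>
    rw [if_pos rfl, if_pos (by rw [ofsK_succ_rep]; ring)]
  | j' + 1 =>
    have hrep := ofsK_succ_rep K (j' + 1)
    have hne : ¬ ofsK K (j' + 1) + 1 = 2 ^ K := by
      have h2 : 2 ^ K * (2 * (j' + 1) + 1) ≥ 2 ^ K * 3 := by
        apply Nat.mul_le_mul_left
        omega
      omega
    rw [if_neg (by omega), if_neg hne]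
    have hadd := ofsK_add K j' 1
    rw [one_mul] at hadd
    have : (j' + 1) - 1 = j' := by omega
    rw [this]
    have h3 : (ofsK K j' : Int) = (ofsK K (j' + 1) : Int) - 2 ^ (K + 1) := by
      rw [hadd]
      push_cast
      ring
    rw [h3]

lemma gmodel_succ_of_ne (K i : Nat) (h : vtz (i + 1) ≠ K) :
    gmodel (K + 1) i = gmodel K i := by
  unfold gmodel
  rcases Nat.lt_trichotomy (vtz (i + 1)) K with hlt | heq | hgt
  · rw [if_pos hlt, if_pos (by omega)]
  · exact absurd heq h
  · rw [if_neg (by omega), if_neg (by omega)]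

lemma length_model (N K : Nat) : (model N K).length = 2 ^ N := by
  simp [model]

lemma getD_model (N K : Nat) (i : Nat) (h : i < 2 ^ N) :
    (model N K).getD i 0 = gmodel K i := by
  simp [model, h]

lemma aStep_model (N K : Nat) (hK : K < N) :
    aStep (((1 <<< N : Nat) : Int)) (model N K) ((K : Int) + 1) = model N (K + 1) := by
  have hp := Nat.two_pow_pos K
  have hKN : 2 ^ K ≤ 2 ^ N := Nat.pow_le_pow_right (by norm_num) (le_of_lt hK)
  have htn : ((K : Int) + 1).toNat = K + 1 := by omega
  have hofs0 : ofsK K 0 = 2 ^ K - 1 := by unfold ofsK; omega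
  have hres := aFill_point (2 ^ N) K (2 ^ N + 1) 0 (model N K) (length_model N K)
    (by omega)
  unfold aStep
  rw [index?_model N K hK, htn, Nat.one_shiftLeft (K + 1), Nat.one_shiftLeft N, length_model]
  simp only [Option.getD_some]
  rw [show ((2 ^ K - 1 : Nat) : Int) = ((ofsK K 0 : Nat) : Int) by rw [hofs0],
    show (-2 : Int) = wK K 0 by simp [wK]]
  obtain ⟨hlen, hw, hu⟩ := hres
  simp only [Nat.zero_add] at hw hu
  apply List.ext_getElem (by rw [hlen, length_model])
  intro i h1 h2
  have hiN : i < 2 ^ N := by rwa [hlen] at h1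
  rw [← List.getD_eq_getElem _ 0 h1, ← List.getD_eq_getElem _ 0 h2, getD_model N (K + 1) i hiN]
  by_cases hv : vtz (i + 1) = K
  · obtain ⟨j, rfl⟩ := (vtz_eq_iff_ofsK K i).mp hv
    rw [hw j hiN, wK_eq_cval]
    unfold gmodel
    rw [if_pos (by omega)]
  · rw [hu i hiN (fun j hij => hv ((vtz_eq_iff_ofsK K i).mpr ⟨j, hij⟩))]
    rw [getD_model N K i hiN, gmodel_succ_of_ne K i hv]

lemma bStep_model (N K : Nat) (hK : K < N) :
    bStep (((1 <<< N : Nat) : Int)) (model N K) ((K : Int) + 1) = model N (K + 1) := by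
  have hp := Nat.two_pow_pos K
  have hs := Nat.two_pow_pos (K + 1)
  have hN := Nat.two_pow_pos N
  have hKN : 2 ^ K ≤ 2 ^ N := Nat.pow_le_pow_right (by norm_num) (le_of_lt hK)
  have hsN : 2 ^ (K + 1) = 2 * 2 ^ K := by ring
  have hKN2 : 2 ^ (K + 1) ≤ 2 ^ N := Nat.pow_le_pow_right (by norm_num) hK
  have htn : ((K : Int) + 1).toNat = K + 1 := by omega
  have htn2 : ((K : Int) + 1 - 1).toNat = K := by omega
  simp only [bStep]
  rw [htn, htn2, Nat.one_shiftLeft (K + 1), Nat.one_shiftLeft K, Nat.one_shiftLeft N]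
  -- the range bounds
  have hstart : (((2 ^ K : Nat) : Int) - 1).toNat = ofsK K 0 := by
    unfold ofsK
    omega
  have hstep : ((2 ^ (K + 1) : Nat) : Int).toNat = 2 ^ (K + 1) := by omega
  set cntN : Nat := (2 ^ N - 2 ^ K + 2 ^ (K + 1)) / 2 ^ (K + 1) with hcnt
  have hcnt_iff : ∀ j : Nat, j < cntN ↔ ofsK K j < 2 ^ N := by
    intro j
    rw [hcnt]
    have h1 : (j + 1) * 2 ^ (K + 1) = j * 2 ^ (K + 1) + 2 ^ (K + 1) := by ring
    constructor
    · intro h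
      have h2 : j + 1 ≤ (2 ^ N - 2 ^ K + 2 ^ (K + 1)) / 2 ^ (K + 1) := by omega
      have h3 := (Nat.le_div_iff_mul_le hs).mp h2
      unfold ofsK
      omega
    · intro h
      have h4 : (j + 1) * 2 ^ (K + 1) ≤ 2 ^ N - 2 ^ K + 2 ^ (K + 1) := by
        unfold ofsK at h
        omega
      have h5 := (Nat.le_div_iff_mul_le hs).mpr h4
      omega
  have hrange : PySem.List.pyRange ((((2 ^ K : Nat) : Int) - 1) - ((2 ^ (K + 1) : Nat) : Int))
        (((2 ^ N : Nat) : Int) - ((2 ^ (K + 1) : Nat) : Int)) ((2 ^ (K + 1) : Nat) : Int)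
      = (List.range cntN).map
          (fun (k : Nat) => ((((2 ^ K : Nat) : Int) - 1) - ((2 ^ (K + 1) : Nat) : Int)) + ((2 ^ (K + 1) : Nat) : Int) * (k : Int)) := by
    rw [PySem.List.pyRange_of_pos _ _ (by exact_mod_cast hs)]
    have hcnt_eq : (if ((((2 ^ K : Nat) : Int) - 1) - ((2 ^ (K + 1) : Nat) : Int)) < (((2 ^ N : Nat) : Int) - ((2 ^ (K + 1) : Nat) : Int)) then
        (((((2 ^ N : Nat) : Int) - ((2 ^ (K + 1) : Nat) : Int)) - ((((2 ^ K : Nat) : Int) - 1) - ((2 ^ (K + 1) : Nat) : Int)) + ((2 ^ (K + 1) : Nat) : Int) - 1) / ((2 ^ (K + 1) : Nat) : Int)).toNat else 0) = cntN := by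
      rw [if_pos (by omega)]
      have : (((2 ^ N : Nat) : Int) - ((2 ^ (K + 1) : Nat) : Int))
          - ((((2 ^ K : Nat) : Int) - 1) - ((2 ^ (K + 1) : Nat) : Int))
          + ((2 ^ (K + 1) : Nat) : Int) - 1
        = ((2 ^ N - 2 ^ K + 2 ^ (K + 1) : Nat) : Int) := by
        omega
      rw [this, ← Int.natCast_div, Int.toNat_natCast]
    rw [hcnt_eq]
  rw [hrange, hstart, hstep]
  set vals : List Int := ((List.range cntN).map
      (fun (k : Nat) => ((((2 ^ K : Nat) : Int) - 1) - ((2 ^ (K + 1) : Nat) : Int)) + ((2 ^ (K + 1) : Nat) : Int) * (k : Int))).set 0 (-2) with hvals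
  have hvlen : vals.length = cntN := by simp [hvals]
  have hvget : ∀ j, j < cntN → vals.getD j 0 = wK K j := by
    intro j hj
    rw [hvals, List.getD_eq_getElem _ _ (by simpa using hj)]
    match j with
    | 0 =>
      rw [List.getElem_set_self (by simpa using hj)]
      simp [wK]
    | j' + 1 =>
      rw [List.getElem_set_ne (by omega)]
      rw [List.getElem_map, List.getElem_range]
      unfold wK
      rw [if_neg (by omega)]
      have hj1 : (j' + 1) - 1 = j' := by omega
      rw [hj1]
      have hmul : ((2 ^ (K + 1) : Nat) : Int) * (((j' + 1) : Nat) : Int)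
          = ((2 ^ (K + 1) * (j' + 1) : Nat) : Int) := by push_cast; ring
      rw [hmul]
      have hexp : 2 ^ (K + 1) * (j' + 1) = j' * 2 ^ (K + 1) + 2 ^ (K + 1) := by ring
      have hofs : ofsK K j' = 2 ^ K - 1 + j' * 2 ^ (K + 1) := rfl
      omega
  obtain ⟨blen, bw, bu⟩ := bAssign_point (2 ^ (K + 1)) hs vals (model N K) (ofsK K 0)
  have hpos_add : ∀ j : Nat, ofsK K 0 + j * 2 ^ (K + 1) = ofsK K j := by
    intro j
    unfold ofsK
    omega
  apply List.ext_getElem (by rw [blen, length_model, length_model])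
  intro i h1 h2
  have hiN : i < 2 ^ N := by rwa [blen, length_model] at h1
  rw [← List.getD_eq_getElem _ 0 h1, ← List.getD_eq_getElem _ 0 h2, getD_model N (K + 1) i hiN]
  by_cases hv : vtz (i + 1) = K
  · obtain ⟨j, rfl⟩ := (vtz_eq_iff_ofsK K i).mp hv
    have hjc : j < cntN := (hcnt_iff j).mpr hiN
    have := bw j (by rw [hvlen]; exact hjc) (by rw [hpos_add, length_model]; exact hiN)
    rw [hpos_add] at this
    rw [this, hvget j hjc, wK_eq_cval]
    unfold gmodel
    rw [if_pos (by omega)]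
  · rw [bu i (by rw [length_model]; exact hiN) (fun j hjv hij =>
      hv ((vtz_eq_iff_ofsK K i).mpr ⟨j, by rw [hpos_add] at hij; exact hij⟩))]
    rw [getD_model N K i hiN, gmodel_succ_of_ne K i hv]

lemma model_zero (N : Nat) : model N 0 = List.replicate (2 ^ N) (-1 : Int) := by
  unfold model
  rw [show gmodel 0 = fun _ => (-1 : Int) from funext (fun i => by simp [gmodel])]
  rw [List.map_const', List.length_range]

lemma fold_model (n_bits : Int) (N : Nat)
    (f : List Int → Int → List Int)
    (hf : ∀ K : Nat, ((K : Int) + 1) < n_bits → f (model N K) ((K : Int) + 1) = model N (K + 1)) :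
    ∀ (t : Nat) (a : Int), 1 ≤ a → a ≤ n_bits → n_bits - a = (t : Int) →
      (PySem.List.pyRange a n_bits 1).foldl f (model N (a - 1).toNat) =
        model N ((n_bits - 1).toNat) := by
  intro t
  induction t with
  | zero =>
    intro a h1 h2 h3
    have ha : a = n_bits := by omega
    rw [ha, PySem.List.pyRange_one_eq_nil (le_refl _), List.foldl_nil]
  | succ t ih =>
    intro a h1 h2 h3
    have hab : a < n_bits := by omega
    rw [PySem.List.pyRange_one_cons hab, List.foldl_cons]
    have hK : (((a - 1).toNat : Int)) + 1 = a := by omega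
    have hstep := hf (a - 1).toNat (by rw [hK]; exact hab)
    rw [hK] at hstep
    rw [hstep]
    have h4 : (a + 1 - 1).toNat = (a - 1).toNat + 1 := by omega
    rw [← h4]
    exact ih (a + 1) (by omega) (by omega) (by omega)

-- ===== VERDICT (by name: the statement is the Claim_ definition above) =====
theorem get_prev_indices_spec : Claim_equal_get_prev_indices := by
  unfold Claim_equal_get_prev_indices
  intro n_bits _ hpre
  unfold Pre_get_prev_indices at hpre
  obtain ⟨hpre, -⟩ := hpre
  unfold Spec_get_prev_indices
  simp only [get_prev_indices, get_prev_indices_alt]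
  set N := n_bits.toNat with hN
  have hinit : List.replicate (((1 <<< N : Nat) : Int)).toNat (-1 : Int) = model N 0 := by
    rw [Int.toNat_natCast, Nat.one_shiftLeft, model_zero]
  by_cases hc : 1 ≤ n_bits
  · have hNb : (n_bits : Int) = (N : Int) := by omega
    have hfA : ∀ K : Nat, ((K : Int) + 1) < n_bits →
        aStep ((1 <<< N : Nat) : Int) (model N K) ((K : Int) + 1) = model N (K + 1) := by
      intro K hKlt
      exact aStep_model N K (by omega)
    have hfB : ∀ K : Nat, ((K : Int) + 1) < n_bits →
        bStep ((1 <<< N : Nat) : Int) (model N K) ((K : Int) + 1) = model N (K + 1) := by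
      intro K hKlt
      exact bStep_model N K (by omega)
    have h0 : ((1 : Int) - 1).toNat = 0 := by omega
    have hA := fold_model n_bits N _ hfA (n_bits - 1).toNat 1 (le_refl _) hc (by omega)
    have hB := fold_model n_bits N _ hfB (n_bits - 1).toNat 1 (le_refl _) hc (by omega)
    rw [h0] at hA hB
    rw [hinit, hA, hB]
  · have hnil : PySem.List.pyRange 1 n_bits 1 = [] :=
      PySem.List.pyRange_one_eq_nil (by omega)
    rw [hnil, List.foldl_nil, List.foldl_nil]
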